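-- pv_equiv track=rewrite | github.com/gexahedron/domblar | domblar/chord_theory.py | parse_voicing
-- ===== SOURCE A (Python) =====
-- def parse_voicing(voicing):
--     # TODO/FIXME: create nice syntax for voicings
--     ops = dict()
--     # FIXME: find a better name
--     chunks = voicing.strip().split(' ')
--     for chunk in chunks:
--         octave = 0
--         octave -= chunk.count('_')
--         chunk = chunk.replace('_', '')
--         octave += chunk.count('^')
--         chunk = chunk.replace('^', '')
--         ops[int(chunk)] = octave
--     return ops
-- ===== SOURCE B (Python) =====
-- def parse_voicing(voicing):
--     ops = dict()
--     for chunk in voicing.strip().split(' '):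
--         octave = 0
--         buf = []
--         for ch in chunk:
--             if ch == '^':
--                 octave += 1
--             elif ch == '_':
--                 octave -= 1
--             else:
--                 buf.append(ch)
--         ops[int(''.join(buf))] = octave
--     return ops
-- ===== Notes on version B (the rewrite author's own statement) =====
-- stated objective: simpler
-- what changed: Each chunk is parsed in a single character loop (one accumulator for the octave, one buffer for the digits) instead of two count passes plus two replace passes over the chunk.
-- outside the precondition, e.g. on parse_voicing('_'): A raises ValueError, B raises ValueError; on parse_voicing('^'): A raises ValueError, B raises ValueError
import Mathlib
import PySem

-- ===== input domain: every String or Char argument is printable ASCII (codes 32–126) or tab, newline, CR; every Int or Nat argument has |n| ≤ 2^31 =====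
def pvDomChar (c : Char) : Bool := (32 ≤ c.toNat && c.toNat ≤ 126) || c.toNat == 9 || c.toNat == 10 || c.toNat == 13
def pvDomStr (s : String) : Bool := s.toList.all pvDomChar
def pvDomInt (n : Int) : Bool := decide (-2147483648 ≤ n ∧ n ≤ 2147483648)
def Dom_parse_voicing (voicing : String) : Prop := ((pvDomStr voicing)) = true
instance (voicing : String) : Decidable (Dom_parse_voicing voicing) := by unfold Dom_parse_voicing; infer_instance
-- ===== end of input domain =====

-- B parses each chunk in ONE character pass instead of A's four passes (count/replace/count/replace); same return value.

-- ===== PORT A =====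
-- the body of A's for-loop (one chunk: two count passes, two replace passes, then int())
def pvStepA (ops : PySem.Dict Int Int) (chunk : String) : PySem.Dict Int Int :=
  let octave : Int := 0
  let octave := octave - (PySem.Str.count chunk "_" : Int)
  let chunk := PySem.Str.replace chunk "_" ""
  let octave := octave + (PySem.Str.count chunk "^" : Int)
  let chunk := PySem.Str.replace chunk "^" ""
  ops.insert ((PySem.Int.ofStr? chunk).getD 0) octave

def parse_voicing (voicing : String) : List (Int × Int) :=
  let chunks := (PySem.Str.split? (PySem.Str.strip voicing) " ").getD []
  (chunks.foldl pvStepA PySem.Dict.empty).items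

-- ===== PORT B =====
-- the body of B's for-loop: ONE character pass accumulating (octave, digit buffer)
def pvStepB (ops : PySem.Dict Int Int) (chunk : String) : PySem.Dict Int Int :=
  let r := chunk.toList.foldl
    (fun (s : Int × List Char) ch =>
      if ch = '^' then (s.1 + 1, s.2)
      else if ch = '_' then (s.1 - 1, s.2)
      else (s.1, s.2 ++ [ch])) ((0 : Int), ([] : List Char))
  ops.insert ((PySem.Int.ofChars? r.2).getD 0) r.1

def parse_voicing_alt (voicing : String) : List (Int × Int) :=
  (((PySem.Str.split? (PySem.Str.strip voicing) " ").getD []).foldl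
    pvStepB PySem.Dict.empty).items

-- ===== PRECONDITION & SPEC =====
-- Pre_ excludes exactly the inputs where Python's int() raises ValueError: a space-split chunk that,
-- after the '_' and '^' markers are removed, is not a valid integer literal (e.g. an empty chunk).
def Pre_parse_voicing (voicing : String) : Prop :=
  ∀ chunk ∈ (PySem.Str.split? (PySem.Str.strip voicing) " ").getD [],
    PySem.Int.ofChars? (chunk.toList.filter (fun c => !(c == '^') && !(c == '_'))) ≠ none
instance (voicing : String) : Decidable (Pre_parse_voicing voicing) := by unfold Pre_parse_voicing; infer_instance

def pvWitness_parse_voicing : String := "1 ^2 __3"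

def Spec_parse_voicing (voicing : String) (out : List (Int × Int)) : Prop := out = parse_voicing_alt voicing
instance (voicing : String) (out : List (Int × Int)) : Decidable (Spec_parse_voicing voicing out) := by unfold Spec_parse_voicing; infer_instance

-- ===== CLAIM (what is proved, stated in full; the proofs are below) =====
def Claim_equal_parse_voicing : Prop := ∀ (voicing : String), Dom_parse_voicing voicing → Pre_parse_voicing voicing → Spec_parse_voicing voicing (parse_voicing voicing)

-- ===== LEMMAS AND PROOFS =====

-- single-character count: Chars.count with a one-char needle is List.count
theorem count_go_singleton (c : Char) (l : List Char) (fuel acc : Nat) (h : l.length ≤ fuel) :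
    PySem.Chars.count.go [c] fuel l acc = acc + l.count c := by
  induction l generalizing fuel acc with
  | nil => cases fuel <;> simp [PySem.Chars.count.go]
  | cons x t ih =>
    cases fuel with
    | zero => simp at h
    | succ n =>
      have hlen : t.length ≤ n := by simp only [List.length_cons] at h; omega
      simp only [PySem.Chars.count.go, List.isPrefixOf]
      by_cases hx : x = c
      · rw [if_pos (by simp [hx])]
        have hdrop : List.drop [c].length (x :: t) = t := rfl
        rw [hdrop, ih n (acc + 1) hlen]
        simp [List.count_cons, hx]
        omega
      · rw [if_neg (by simp [Ne.symm hx])]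
        rw [ih n acc hlen]
        simp [List.count_cons, hx, Ne.symm hx]

theorem count_singleton (c : Char) (l : List Char) :
    PySem.Chars.count l [c] = l.count c := by
  simp [PySem.Chars.count, count_go_singleton c l l.length 0 le_rfl]

-- single-character replace by the empty string is filter
theorem replace_go_singleton (c : Char) (l : List Char) (fuel : Nat) (acc : List Char)
    (h : l.length ≤ fuel) :
    PySem.Chars.replace.go [c] [] fuel l acc = acc.reverse ++ l.filter (fun x => x != c) := by
  induction l generalizing fuel acc with
  | nil => cases fuel <;> simp [PySem.Chars.replace.go]
  | cons x t ih =>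
    cases fuel with
    | zero => simp at h
    | succ n =>
      have hlen : t.length ≤ n := by simp only [List.length_cons] at h; omega
      simp only [PySem.Chars.replace.go, List.isPrefixOf]
      by_cases hx : x = c
      · rw [if_pos (by simp [hx])]
        have hdrop : List.drop [c].length (x :: t) = t := rfl
        rw [hdrop, ih n ([].reverse ++ acc) hlen]
        simp [List.filter_cons, hx]
      · rw [if_neg (by simp [Ne.symm hx])]
        rw [ih n (x :: acc) hlen]
        simp [List.filter_cons, hx, Ne.symm hx]

theorem replace_singleton (c : Char) (l : List Char) :
    PySem.Chars.replace l [c] [] = l.filter (fun x => x != c) := by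
  simp [PySem.Chars.replace, replace_go_singleton c l l.length [] le_rfl]

-- B's inner character loop, characterised
theorem inner_fold_eq (l : List Char) (o : Int) (b : List Char) :
    l.foldl (fun (s : Int × List Char) ch =>
        if ch = '^' then (s.1 + 1, s.2)
        else if ch = '_' then (s.1 - 1, s.2)
        else (s.1, s.2 ++ [ch])) (o, b)
      = (o + (l.count '^' : Int) - (l.count '_' : Int),
         b ++ l.filter (fun c => !(c == '^') && !(c == '_'))) := by
  induction l generalizing o b with
  | nil => simp
  | cons x t ih =>
    rw [List.foldl_cons]
    by_cases h1 : x = '^'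
    · rw [if_pos h1, ih]
      simp [h1]
      omega
    · by_cases h2 : x = '_'
      · rw [if_neg h1, if_pos h2, ih]
        simp [h1, h2]
        omega
      · rw [if_neg h1, if_neg h2, ih]
        simp [h1, h2]

-- per-chunk step functions of the two ports agree
theorem step_eq : pvStepA = pvStepB := by
  funext ops chunk
  unfold pvStepA pvStepB
  simp only [inner_fold_eq, PySem.Int.ofStr?, PySem.Str.count_eq, PySem.Str.toList_replace]
  have h1 : ("_" : String).toList = ['_'] := rfl
  have h2 : ("^" : String).toList = ['^'] := rfl
  have h3 : ("" : String).toList = [] := rfl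
  rw [h1, h2, h3, replace_singleton, count_singleton, count_singleton, replace_singleton,
    List.filter_filter]
  have hcnt : (List.filter (fun x => x != '_') chunk.toList).count '^'
      = chunk.toList.count '^' := by
    simp [List.count_filter]
  rw [hcnt]
  have hfil : List.filter (fun a => (a != '^') && (a != '_')) chunk.toList
      = List.filter (fun c => !(c == '^') && !(c == '_')) chunk.toList := by
    apply List.filter_congr; intro x _; simp [bne]
  rw [hfil]
  have harith : (0 : Int) - (chunk.toList.count '_' : Int) + (chunk.toList.count '^' : Int)
      = 0 + (chunk.toList.count '^' : Int) - (chunk.toList.count '_' : Int) := by omega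
  rw [harith, List.nil_append]

-- ===== VERDICT (by name: the statement is the Claim_ definition above) =====
theorem parse_voicing_spec : Claim_equal_parse_voicing := by
  intro voicing _ _
  unfold Spec_parse_voicing parse_voicing parse_voicing_alt
  rw [step_eq]
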